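-- pv_equiv track=rewrite | github.com/alanlindsay100/mast_xaip_toolkit | xaip_tools/planning/state_reclaimer.py | breakIntoSubLists
-- ===== SOURCE A (Python) =====
-- def breakIntoSubLists(l, breaker_el) :
--   nl = []
--   cl = []
--   for e in l +[breaker_el] :
--     if e == breaker_el :
--       if len(cl) > 0 :
--         nl.append(cl)
--         cl = []
--     else :
--       cl.append(e)
--   return nl
-- ===== SOURCE B (Python) =====
-- from itertools import groupby
--
--
-- def breakIntoSubLists(l, breaker_el):
--     return [list(g) for k, g in groupby(l, key=lambda e: e == breaker_el) if not k]
-- ===== Notes on version B (the rewrite author's own statement) =====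
-- stated objective: idiomatic
-- what changed: Replaces the manual accumulator with sentinel append and length guard by itertools.groupby over runs of breaker/non-breaker elements, keeping the non-breaker runs.
import Mathlib
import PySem

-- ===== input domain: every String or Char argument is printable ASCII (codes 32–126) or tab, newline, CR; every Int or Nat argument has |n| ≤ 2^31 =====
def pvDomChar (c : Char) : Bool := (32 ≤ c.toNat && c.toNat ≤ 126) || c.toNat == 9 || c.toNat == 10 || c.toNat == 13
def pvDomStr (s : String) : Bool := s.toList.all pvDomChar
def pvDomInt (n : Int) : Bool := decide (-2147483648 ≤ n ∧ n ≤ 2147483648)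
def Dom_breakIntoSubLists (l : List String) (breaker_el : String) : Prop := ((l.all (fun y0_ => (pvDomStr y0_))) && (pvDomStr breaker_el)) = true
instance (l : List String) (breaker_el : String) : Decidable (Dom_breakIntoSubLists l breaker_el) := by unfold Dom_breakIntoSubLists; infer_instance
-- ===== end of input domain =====

-- B replaces A's manual accumulator (sentinel append + length guard) by grouping
-- consecutive runs and keeping the non-breaker runs (itertools.groupby); idiomatic, same cost.

-- ===== PORT A =====
-- A: fold over l ++ [breaker_el] carrying (nl, cl); on a breaker flush cl if nonempty.
def breakIntoSubListsStep (breaker_el : String)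
    (st : List (List String) × List String) (e : String) :
    List (List String) × List String :=
  if e = breaker_el then
    if st.2.length > 0 then (st.1 ++ [st.2], []) else st
  else
    (st.1, st.2 ++ [e])

def breakIntoSubLists (l : List String) (breaker_el : String) : List (List String) :=
  ((l ++ [breaker_el]).foldl (breakIntoSubListsStep breaker_el) ([], [])).1

-- ===== PORT B =====
-- B: groupby — skip a breaker run element, otherwise emit the maximal non-breaker run.
def breakIntoSubLists_alt (l : List String) (breaker_el : String) : List (List String) :=
  match l with
  | [] => []
  | e :: t =>
    if e = breaker_el then breakIntoSubLists_alt t breaker_el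
    else (e :: t.takeWhile (fun x => ¬ (x = breaker_el))) ::
         breakIntoSubLists_alt (t.dropWhile (fun x => ¬ (x = breaker_el))) breaker_el
termination_by l.length
decreasing_by
  · simp
  · have := List.length_dropWhile_le (p := fun x => decide ¬ (x = breaker_el)) (l := t)
    simp only [List.length_cons]; omega

-- ===== PRECONDITION & SPEC =====
def Spec_breakIntoSubLists (l : List String) (breaker_el : String) (out : List (List String)) : Prop := out = breakIntoSubLists_alt l breaker_el
instance (l : List String) (breaker_el : String) (out : List (List String)) : Decidable (Spec_breakIntoSubLists l breaker_el out) := by unfold Spec_breakIntoSubLists; infer_instance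

-- ===== CLAIM (what is proved, stated in full; the proofs are below) =====
def Claim_equal_breakIntoSubLists : Prop := ∀ (l : List String) (breaker_el : String), Dom_breakIntoSubLists l breaker_el → Spec_breakIntoSubLists l breaker_el (breakIntoSubLists l breaker_el)

-- ===== LEMMAS AND PROOFS =====

-- the fold's output accumulator is only appended to
theorem breakIntoSubLists_foldl_acc (br : String) (xs : List String)
    (nl : List (List String)) (cl : List String) :
    xs.foldl (breakIntoSubListsStep br) (nl, cl)
      = (nl ++ (xs.foldl (breakIntoSubListsStep br) ([], cl)).1,
         (xs.foldl (breakIntoSubListsStep br) ([], cl)).2) := by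
  induction xs generalizing nl cl with
  | nil => simp
  | cons e t ih =>
    simp only [List.foldl_cons]
    by_cases he : e = br
    · by_cases hc : cl.length > 0
      · have h1 : breakIntoSubListsStep br (nl, cl) e = (nl ++ [cl], []) := by
          simp [breakIntoSubListsStep, he, hc]
        have h2 : breakIntoSubListsStep br ([], cl) e = ([cl], []) := by
          simp [breakIntoSubListsStep, he, hc]
        rw [h1, h2, ih (nl ++ [cl]) [], ih [cl] []]
        simp
      · have h1 : breakIntoSubListsStep br (nl, cl) e = (nl, cl) := by
          simp [breakIntoSubListsStep, he, hc]
        have h2 : breakIntoSubListsStep br ([], cl) e = ([], cl) := by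
          simp [breakIntoSubListsStep, he, hc]
        rw [h1, h2]
        exact ih nl cl
    · have h1 : breakIntoSubListsStep br (nl, cl) e = (nl, cl ++ [e]) := by
        simp [breakIntoSubListsStep, he]
      have h2 : breakIntoSubListsStep br ([], cl) e = ([], cl ++ [e]) := by
        simp [breakIntoSubListsStep, he]
      rw [h1, h2, ih nl (cl ++ [e]), ih [] (cl ++ [e])]

-- joint invariant, by strong induction on length
theorem breakIntoSubLists_mainAux (br : String) (n : Nat) :
    ∀ l : List String, l.length ≤ n →
    ((l ++ [br]).foldl (breakIntoSubListsStep br) ([], [])).1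
      = breakIntoSubLists_alt l br
    ∧ ∀ cl : List String, cl ≠ [] →
      ((l ++ [br]).foldl (breakIntoSubListsStep br) ([], cl)).1
        = (cl ++ l.takeWhile (fun x => ¬ (x = br))) ::
          breakIntoSubLists_alt (l.dropWhile (fun x => ¬ (x = br))) br := by
  induction n with
  | zero =>
    intro l hl
    match l, List.length_eq_zero_iff.mp (Nat.le_zero.mp hl) with
    | [], _ =>
      constructor
      · simp [breakIntoSubListsStep, breakIntoSubLists_alt]
      · intro cl hcl
        simp [breakIntoSubListsStep, List.length_pos_iff.mpr hcl, breakIntoSubLists_alt]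
  | succ n ih0 =>
    intro l hl
    match l with
    | [] =>
      constructor
      · simp [breakIntoSubListsStep, breakIntoSubLists_alt]
      · intro cl hcl
        simp [breakIntoSubListsStep, List.length_pos_iff.mpr hcl, breakIntoSubLists_alt]
    | e :: t =>
      have iht := ih0 t (by simpa using Nat.le_of_succ_le_succ hl)
      constructor
      · by_cases he : e = br
        · simpa [breakIntoSubListsStep, he, breakIntoSubLists_alt] using iht.1
        · have hd : ((t ++ [br]).foldl (breakIntoSubListsStep br) ([], [e])).1
              = ([e] ++ t.takeWhile (fun x => ¬ (x = br))) ::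
                breakIntoSubLists_alt (t.dropWhile (fun x => ¬ (x = br))) br :=
            iht.2 [e] (by simp)
          simp only [List.cons_append, List.foldl_cons, breakIntoSubListsStep, he, ite_false]
          simpa [breakIntoSubLists_alt, he] using hd
      · intro cl hcl
        by_cases he : e = br
        · -- flush cl, then continue with empty cl on t ++ [br]
          subst he
          have hflush : breakIntoSubListsStep e ([], cl) e = ([cl], []) := by
            simp [breakIntoSubListsStep, List.length_pos_iff.mpr hcl]
          simp only [List.cons_append, List.foldl_cons, hflush]
          rw [breakIntoSubLists_foldl_acc e (t ++ [e]) [cl] []]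
          have h1 := iht.1
          rw [List.foldl_append] at h1
          simp only [List.foldl_cons, List.foldl_nil] at h1
          simp [h1, breakIntoSubLists_alt]
        · have hd := iht.2 (cl ++ [e]) (by simp)
          simp only [List.cons_append, List.foldl_cons, breakIntoSubListsStep, he, ite_false]
          rw [hd]
          simp [he, List.takeWhile, List.dropWhile]

-- ===== VERDICT (by name: the statement is the Claim_ definition above) =====
theorem breakIntoSubLists_spec : Claim_equal_breakIntoSubLists := by
  intro l br _
  unfold Spec_breakIntoSubLists breakIntoSubLists
  exact (breakIntoSubLists_mainAux br l.length l le_rfl).1
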